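-- pv_equiv track=rewrite | github.com/TamarSaad/University-Assignments | Lamut/ex3/exercise3_207256991_208812628.py | find_srr
-- ===== SOURCE A (Python) =====
-- def find_srr(dna_seq):
--     # flag to know if there are satellites
--     satellites = {}
--     # looking for microsatellites in increasing sizes of nucleotides
--     for size_of_match in range(1, 7):
--         # looking for satellite in different reading frames
--         for i in range(len(dna_seq) - (len(dna_seq) % size_of_match)):
--             count = 1  # number of repeats
--             # checking for repeats
--             for j in range(i, len(dna_seq) - (len(dna_seq) % size_of_match), size_of_match):
--                 # if the sequences are the same- increase the counter
--                 if dna_seq[j: j + size_of_match] == dna_seq[j + size_of_match: j + 2 * size_of_match]: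
--                     count += 1
--                 else:
--                     # if the sequences are different and there are more than 3 repeats- add it to the dictionary
--                     if count >= 3:
--                         satellite = dna_seq[j: j + size_of_match]
--                         # if the satellite exists already- check if the count is bigger
--                         if satellite in satellites.keys():
--                             if count <= satellites[satellite]:
--                                 break
--                         # if the satellite didn't exist/the count is smaller- update the dictionary
--                         satellites[satellite] = count
--                     break
--         size_of_match += 1
--     if satellites:
--         sat_list = ""
--         for satellite, count in sorted(satellites.items(), key=lambda t: t[0]):
--             sat_list += satellite + "," + str(count) + ";"
--         return sat_list[:-1]
--     else:
--         return None
-- ===== SOURCE B (Python) =====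
-- def find_srr(dna_seq):
--     n = len(dna_seq)
--     best = {}
--     for k in range(1, 7):
--         limit = n - n % k
--         for f in range(k):
--             c = 0
--             # right-to-left dynamic-programming pass over this reading frame:
--             # c(i) = c(i+k)+1 if the unit at i matches the next one, else 1
--             for i in reversed(range(f, limit, k)):
--                 c = c + 1 if dna_seq[i:i + k] == dna_seq[i + k:i + 2 * k] else 1
--                 if c >= 3:
--                     u = dna_seq[i:i + k]
--                     if c > best.get(u, 0):
--                         best[u] = c
--     if best:
--         return ";".join(u + "," + str(c) for u, c in sorted(best.items()))
--     return None
-- ===== Notes on version B (the rewrite author's own statement) =====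
-- stated objective: faster
-- what changed: Instead of restarting a repeat-counting scan at every start position (A's nested i/j loops recompute each run from scratch), B makes one right-to-left dynamic-programming pass per unit size and reading frame, maintaining the run length c(i)=c(i+k)+1 on a match and updating a per-unit max dict, then renders the sorted dict with join.
import Mathlib
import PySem

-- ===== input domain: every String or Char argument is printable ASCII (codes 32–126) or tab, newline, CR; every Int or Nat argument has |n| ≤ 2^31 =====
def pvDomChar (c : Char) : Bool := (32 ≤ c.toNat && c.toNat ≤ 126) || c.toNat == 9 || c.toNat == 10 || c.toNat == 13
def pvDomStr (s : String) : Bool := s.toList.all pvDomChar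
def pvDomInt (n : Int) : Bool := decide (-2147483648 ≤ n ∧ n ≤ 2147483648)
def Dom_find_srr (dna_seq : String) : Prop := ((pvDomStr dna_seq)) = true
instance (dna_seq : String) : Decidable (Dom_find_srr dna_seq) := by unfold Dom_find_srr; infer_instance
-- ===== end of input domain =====

-- B replaces A's per-start rescan of every repeat run by one right-to-left DP pass per unit
-- size and reading frame (run length c(i)=c(i+k)+1 on a match), keeping a per-unit max dict.

-- ===== PORT A =====
-- the inner 'for j in range(i, len - len % size, size)' loop of A, with its break
def findSrrInner (s : String) (size : Int) (js : List Int) (count : Int)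
    (sats : PySem.Dict String Int) : PySem.Dict String Int :=
  match js with
  | [] => sats
  | j :: rest =>
    if PySem.Str.slice s (some j) (some (j + size)) ==
        PySem.Str.slice s (some (j + size)) (some (j + 2 * size)) then
      findSrrInner s size rest (count + 1) sats
    else
      if 3 ≤ count then
        let satellite := PySem.Str.slice s (some j) (some (j + size))
        if sats.contains satellite && decide (count ≤ sats.getD satellite 0) then sats
        else sats.insert satellite count
      else sats

def find_srr (dna_seq : String) : Option String :=
  let L : Int := PySem.Str.len dna_seq
  let satellites :=
    (PySem.List.pyRange 1 7 1).foldl (fun sats size =>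
      (PySem.List.pyRange 0 (L - PySem.Int.mod L size) 1).foldl (fun sats i =>
        findSrrInner dna_seq size (PySem.List.pyRange i (L - PySem.Int.mod L size) size) 1 sats)
        sats)
      PySem.Dict.empty
  if satellites.size ≠ 0 then
    let sat_list := (PySem.List.sorted satellites.items (fun t => t.1) false).foldl
      (fun acc p => acc ++ p.1 ++ "," ++ PySem.Int.toStr p.2 ++ ";") ""
    some (PySem.Str.slice sat_list none (some (-1)))
  else none

-- ===== PORT B =====
-- B's 'for i in reversed(range(f, limit, k))' DP pass; returns (current run length, dict)
def findSrrAltInner (s : String) (k : Int) (is_ : List Int) (c : Int)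
    (best : PySem.Dict String Int) : Int × PySem.Dict String Int :=
  match is_ with
  | [] => (c, best)
  | i :: rest =>
    let c' := if PySem.Str.slice s (some i) (some (i + k)) ==
        PySem.Str.slice s (some (i + k)) (some (i + 2 * k)) then c + 1 else 1
    let best' :=
      if 3 ≤ c' then
        let u := PySem.Str.slice s (some i) (some (i + k))
        if best.getD u 0 < c' then best.insert u c' else best
      else best
    findSrrAltInner s k rest c' best'

def find_srr_alt (dna_seq : String) : Option String :=
  let n : Int := PySem.Str.len dna_seq
  let best :=
    (PySem.List.pyRange 1 7 1).foldl (fun best k =>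
      (PySem.List.pyRange 0 k 1).foldl (fun best f =>
        (findSrrAltInner dna_seq k
          (PySem.List.pyRange f (n - PySem.Int.mod n k) k).reverse 0 best).2) best)
      PySem.Dict.empty
  if best.size ≠ 0 then
    some (PySem.Str.join ";"
      ((PySem.List.sorted best.items (fun t => t.1) false).map
        (fun p => p.1 ++ "," ++ PySem.Int.toStr p.2)))
  else none

-- ===== PRECONDITION & SPEC =====
def Spec_find_srr (dna_seq : String) (out : Option String) : Prop := out = find_srr_alt dna_seq
instance (dna_seq : String) (out : Option String) : Decidable (Spec_find_srr dna_seq out) := by unfold Spec_find_srr; infer_instance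

-- ===== CLAIM (what is proved, stated in full; the proofs are below) =====
def Claim_equal_find_srr : Prop := ∀ (dna_seq : String), Dom_find_srr dna_seq → Spec_find_srr dna_seq (find_srr dna_seq)

-- ===== LEMMAS AND PROOFS =====

-- abbreviations for the proof
def sl (s : String) (a b : Int) : String := PySem.Str.slice s (some a) (some b)

def mtc (s : String) (k j : Int) : Bool := sl s j (j + k) == sl s (j + k) (j + 2 * k)

def lim (s : String) (k : Int) : Int := PySem.Str.len s - PySem.Int.mod (PySem.Str.len s) k

-- the common 'record one repeat count' dict update both programs perform
def step (d : PySem.Dict String Int) (p : String × Int) : PySem.Dict String Int :=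
  if 3 ≤ p.2 then (if d.getD p.1 0 < p.2 then d.insert p.1 p.2 else d) else d

-- run length of the repeat chain starting at the head of a frame position list
def cval (s : String) (k : Int) : List Int → Int
  | [] => 0
  | j :: rest => if mtc s k j then cval s k rest + 1 else 1

-- the record both programs produce for start position i (unit, run count)
def recAt (s : String) (k i : Int) : String × Int :=
  (sl s i (i + k), cval s k (PySem.List.pyRange i (lim s k) k))

-- the records B's DP pass produces along an ascending frame list
def recsOf (s : String) (k : Int) : List Int → List (String × Int)
  | [] => []
  | j :: rest => (sl s j (j + k), cval s k (j :: rest)) :: recsOf s k rest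

-- ---- generic pyRange (positive step) structure ----
lemma pyRangeK_nil (a b k : Int) (hk : 0 < k) (h : b ≤ a) : PySem.List.pyRange a b k = [] := by
  rw [PySem.List.pyRange_of_pos _ _ hk, if_neg (by omega)]
  simp

lemma pyRangeK_cons (a b k : Int) (hk : 0 < k) (h : a < b) :
    PySem.List.pyRange a b k = a :: PySem.List.pyRange (a + k) b k := by
  rw [PySem.List.pyRange_of_pos _ _ hk, PySem.List.pyRange_of_pos _ _ hk, if_pos h]
  have hkne : k ≠ 0 := by omega
  have key : (b - a + k - 1) / k = (b - (a + k) + k - 1) / k + 1 := by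
    have h1 : b - a + k - 1 = (b - (a + k) + k - 1) + 1 * k := by ring
    rw [h1, Int.add_mul_ediv_right _ _ hkne]
  by_cases h2 : a + k < b
  · rw [if_pos h2, key]
    have hq0 : 0 ≤ (b - (a + k) + k - 1) / k := Int.ediv_nonneg (by omega) (by omega)
    rw [show ((b - (a + k) + k - 1) / k + 1).toNat = ((b - (a + k) + k - 1) / k).toNat + 1 from by
      omega]
    rw [List.range_succ_eq_map]
    simp only [List.map_cons, List.map_map, Nat.cast_zero, mul_zero, add_zero]
    congr 1
    apply List.map_congr_left
    intro t _
    simp only [Function.comp_apply, Nat.succ_eq_add_one]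
    push_cast
    ring
  · rw [if_neg h2, key]
    rw [show (b - (a + k) + k - 1) / k = 0 from Int.ediv_eq_zero_of_lt (by omega) (by omega)]
    simp

lemma nodup_pyRangeK (a b k : Int) (hk : 0 < k) : (PySem.List.pyRange a b k).Nodup := by
  rw [PySem.List.pyRange_of_pos _ _ hk]
  refine List.Nodup.map ?_ List.nodup_range
  intro t1 t2 hteq
  have hteq' : a + k * (t1 : Int) = a + k * (t2 : Int) := hteq
  have h1 : k * (t1 : Int) = k * (t2 : Int) := by omega
  have h2 := mul_left_cancel₀ (show k ≠ 0 by omega) h1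
  exact_mod_cast h2

-- ---- the last frame position never matches (Python's trailing slice is shorter) ----
lemma last_no_match (s : String) (k j : Int) (hk : 1 ≤ k) (hj0 : 0 ≤ j)
    (hjl : j < lim s k) (hlast : lim s k ≤ j + k) : mtc s k j = false := by
  obtain ⟨jn, rfl⟩ := Int.eq_ofNat_of_zero_le hj0
  obtain ⟨kn, rfl⟩ := Int.eq_ofNat_of_zero_le (show (0:Int) ≤ k by omega)
  unfold mtc
  rw [beq_eq_false_iff_ne]
  intro he
  have he' := congrArg String.toList he
  unfold sl at he'
  rw [PySem.Str.toList_slice, PySem.Str.toList_slice, PySem.Chars.slice_eq_listSlice,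
    PySem.Chars.slice_eq_listSlice] at he'
  rw [PySem.List.slice_natCast_add] at he'
  rw [show ((jn:Int) + kn) = ((jn + kn : Nat) : Int) from by push_cast; ring] at he'
  rw [show ((jn:Int) + 2 * kn) = (((jn + kn : Nat) : Int) + (kn : Int)) from by push_cast; ring]
    at he'
  rw [PySem.List.slice_natCast_add] at he'
  have hlen := congrArg List.length he'
  simp only [List.length_take, List.length_drop] at hlen
  unfold lim at hjl hlast
  rw [PySem.Str.len_eq] at hjl hlast
  have hmn := PySem.Int.mod_nonneg ((s.toList.length : Int)) (show (0:Int) < kn by omega)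
  have hml := PySem.Int.mod_lt ((s.toList.length : Int)) (show (0:Int) < kn by omega)
  rw [Nat.min_def, Nat.min_def] at hlen
  split_ifs at hlen <;> omega

-- ---- characterization of A's inner loop ----
lemma stepA_eq (d : PySem.Dict String Int) (u : String) (c : Int) :
    (if 3 ≤ c then
      (if d.contains u && decide (c ≤ d.getD u 0) then d else d.insert u c) else d)
    = step d (u, c) := by
  unfold step
  dsimp only
  by_cases h3 : 3 ≤ c
  · rw [if_pos h3, if_pos h3]
    cases hc : d.contains u with
    | false =>
      have h0 := PySem.Dict.getD_of_not_contains d (0:Int) hc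
      simp [h0, show (0:Int) < c from by omega]
    | true =>
      by_cases hle : c ≤ d.getD u 0
      · simp [hc, not_lt.mpr hle]
      · simp [hc, not_le.mp hle]
  · rw [if_neg h3, if_neg h3]

lemma findSrrInner_eq (s : String) (k : Int) (js : List Int) (c : Int)
    (d : PySem.Dict String Int) :
    findSrrInner s k js c d =
      match js.dropWhile (mtc s k) with
      | [] => d
      | j :: _ => step d (sl s j (j + k), c + ((js.takeWhile (mtc s k)).length : Int)) := by
  induction js generalizing c with
  | nil => simp [findSrrInner]
  | cons j rest ih =>
    have hcond : (PySem.Str.slice s (some j) (some (j + k)) ==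
        PySem.Str.slice s (some (j + k)) (some (j + 2 * k))) = mtc s k j := rfl
    simp only [findSrrInner, hcond, List.dropWhile_cons, List.takeWhile_cons]
    cases hmb : mtc s k j with
    | true =>
      simp only [if_true]
      rw [ih]
      cases hdw : List.dropWhile (mtc s k) rest with
      | nil => simp
      | cons j' t =>
        dsimp only
        exact congrArg (step d) (by
          simp only [Prod.mk.injEq, List.length_cons]
          exact ⟨trivial, by push_cast; ring⟩)
    | false =>
      simp only [Bool.false_eq_true, if_false]
      rw [show c + ((List.length ([] : List Int) : Nat) : Int) = c from by simp]
      exact stepA_eq d (sl s j (j + k)) c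

-- the three frame facts, by strong induction down the frame
lemma frame_facts (s : String) (k : Int) (hk : 1 ≤ k) :
    ∀ n i, (lim s k - i).toNat ≤ n → 0 ≤ i → i < lim s k →
      cval s k (PySem.List.pyRange i (lim s k) k)
        = 1 + (((PySem.List.pyRange i (lim s k) k).takeWhile (mtc s k)).length : Int) ∧
      ((PySem.List.pyRange i (lim s k) k).dropWhile (mtc s k)).head?.map
          (fun j => sl s j (j + k)) = some (sl s i (i + k)) := by
  intro n
  induction n with
  | zero => intro i hle h0 hi; omega
  | succ n ih =>
    intro i hle h0 hi
    rw [pyRangeK_cons _ _ _ (by omega) hi]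
    cases hm : mtc s k i with
    | true =>
      have hik : i + k < lim s k := by
        by_contra hnk
        push Not at hnk
        have := last_no_match s k i hk h0 hi hnk
        rw [hm] at this
        exact Bool.noConfusion this
      obtain ⟨ih1, ih2⟩ := ih (i + k) (by omega) (by omega) hik
      have hm' : sl s i (i + k) = sl s (i + k) (i + 2 * k) := by
        have := hm
        unfold mtc at this
        exact beq_iff_eq.mp this
      constructor
      · rw [show cval s k (i :: PySem.List.pyRange (i + k) (lim s k) k)
              = cval s k (PySem.List.pyRange (i + k) (lim s k) k) + 1 from by
            simp [cval, hm],
          ih1, List.takeWhile_cons, if_pos hm, List.length_cons]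
        push_cast
        ring
      · rw [List.dropWhile_cons, if_pos hm, ih2,
          show i + k + k = i + 2 * k from by ring, ← hm']
    | false =>
      constructor
      · rw [show cval s k (i :: PySem.List.pyRange (i + k) (lim s k) k) = 1 from by
            simp [cval, hm],
          List.takeWhile_cons, if_neg (by simp [hm])]
        simp
      · rw [List.dropWhile_cons, if_neg (by simp [hm])]
        simp

-- A's inner loop on a frame performs exactly the canonical record step
lemma findSrrInner_step (s : String) (k i : Int) (hk : 1 ≤ k) (h0 : 0 ≤ i)
    (hi : i < lim s k) (d : PySem.Dict String Int) :
    findSrrInner s k (PySem.List.pyRange i (lim s k) k) 1 d = step d (recAt s k i) := by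
  obtain ⟨h1, h2⟩ := frame_facts s k hk (lim s k - i).toNat i le_rfl h0 hi
  rw [findSrrInner_eq]
  cases hdw : (PySem.List.pyRange i (lim s k) k).dropWhile (mtc s k) with
  | nil => rw [hdw] at h2; simp at h2
  | cons j t =>
    rw [hdw] at h2
    simp only [List.head?_cons, Option.map_some] at h2
    have h2' : sl s j (j + k) = sl s i (i + k) := by simpa using h2
    unfold recAt
    dsimp only
    rw [h2', ← h1]

-- ---- characterization of B's inner loop ----
lemma findSrrAltInner_append (s : String) (k : Int) (xs ys : List Int) (c : Int)
    (d : PySem.Dict String Int) :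
    findSrrAltInner s k (xs ++ ys) c d =
      findSrrAltInner s k ys (findSrrAltInner s k xs c d).1 (findSrrAltInner s k xs c d).2 := by
  induction xs generalizing c d with
  | nil => simp [findSrrAltInner]
  | cons x xs ih =>
    simp only [List.cons_append, findSrrAltInner]
    exact ih _ _

lemma findSrrAltInner_eq (s : String) (k : Int) (js : List Int) (d : PySem.Dict String Int) :
    findSrrAltInner s k js.reverse 0 d =
      (cval s k js, (recsOf s k js).reverse.foldl step d) := by
  induction js generalizing d with
  | nil => simp [findSrrAltInner, cval, recsOf]
  | cons j rest ih =>
    rw [List.reverse_cons, findSrrAltInner_append, ih]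
    simp only [recsOf, List.reverse_cons, List.foldl_append, List.foldl_cons, List.foldl_nil,
      findSrrAltInner]
    rfl

lemma recsOf_frame (s : String) (k : Int) (hk : 1 ≤ k) :
    ∀ n i, (lim s k - i).toNat ≤ n → 0 ≤ i →
      recsOf s k (PySem.List.pyRange i (lim s k) k)
        = (PySem.List.pyRange i (lim s k) k).map (recAt s k) := by
  intro n
  induction n with
  | zero =>
    intro i hle h0
    rw [pyRangeK_nil _ _ _ (by omega) (by omega)]
    simp [recsOf]
  | succ n ih =>
    intro i hle h0
    by_cases hi : i < lim s k
    · rw [pyRangeK_cons _ _ _ (by omega) hi]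
      simp only [recsOf, List.map_cons]
      congr 1
      · unfold recAt
        rw [pyRangeK_cons _ _ _ (by omega) hi]
      · exact ih (i + k) (by omega) (by omega)
    · push Not at hi
      rw [pyRangeK_nil _ _ _ (by omega) hi]
      simp [recsOf]

-- ---- permutation of the record lists ----
lemma flatMap_foldl_step (l : List Int) (g : Int → List (String × Int))
    (d : PySem.Dict String Int) :
    l.foldl (fun d f => (g f).foldl step d) d = (l.flatMap g).foldl step d := by
  induction l generalizing d with
  | nil => simp
  | cons x t ih => simp only [List.foldl_cons, List.flatMap_cons, List.foldl_append]; exact ih _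

lemma perm_flatMap_congr {α β : Type} (l : List α) (f g : α → List β)
    (h : ∀ x ∈ l, (f x).Perm (g x)) : (l.flatMap f).Perm (l.flatMap g) := by
  induction l with
  | nil => simp
  | cons x t ih =>
    simp only [List.flatMap_cons]
    exact (h x (by simp)).append (ih fun y hy => h y (by simp [hy]))

lemma frames_perm (s : String) (k : Int) (hk : 1 ≤ k) :
    ((PySem.List.pyRange 0 k 1).flatMap
        (fun f => (PySem.List.pyRange f (lim s k) k).reverse)).Perm
      (PySem.List.pyRange 0 (lim s k) 1) := by
  have hk0 : (0:Int) < k := by omega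
  rw [List.perm_ext_iff_of_nodup ?nd1 ?nd2]
  case nd1 =>
    rw [List.nodup_flatMap]
    constructor
    · intro f _
      exact List.nodup_reverse.mpr (nodup_pyRangeK f _ k hk0)
    · refine List.Pairwise.imp_of_mem ?_ (PySem.List.pairwise_lt_pyRange_one 0 k)
      intro f1 f2 h1 h2 hlt12 x hx1 hx2
      rw [List.mem_reverse, PySem.List.mem_pyRange_iff_of_pos hk0] at hx1 hx2
      rw [PySem.List.mem_pyRange_one] at h1 h2
      obtain ⟨_, _, d1⟩ := hx1
      obtain ⟨_, _, d2⟩ := hx2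
      have hdvd : k ∣ f2 - f1 := by
        have := dvd_sub d1 d2
        rw [show x - f1 - (x - f2) = f2 - f1 from by ring] at this
        exact this
      have := Int.le_of_dvd (by omega) hdvd
      omega
  case nd2 => exact PySem.List.nodup_pyRange_one 0 (lim s k)
  intro x
  rw [List.mem_flatMap, PySem.List.mem_pyRange_one]
  constructor
  · rintro ⟨f, hf, hx⟩
    rw [List.mem_reverse, PySem.List.mem_pyRange_iff_of_pos hk0] at hx
    rw [PySem.List.mem_pyRange_one] at hf
    omega
  · intro hx
    refine ⟨PySem.Int.mod x k, ?_, ?_⟩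
    · rw [PySem.List.mem_pyRange_one]
      exact ⟨PySem.Int.mod_nonneg x hk0, PySem.Int.mod_lt x hk0⟩
    · rw [List.mem_reverse, PySem.List.mem_pyRange_iff_of_pos hk0]
      have hdm := PySem.Int.floordiv_mul_add_mod x k
      have hml := PySem.Int.mod_lt x hk0
      have hmn := PySem.Int.mod_nonneg x hk0
      have hfd : 0 ≤ PySem.Int.floordiv x k := by
        by_contra hneg
        push Not at hneg
        have h1 : PySem.Int.floordiv x k ≤ -1 := by omega
        have h2 : PySem.Int.floordiv x k * k ≤ -1 * k := mul_le_mul_of_nonneg_right h1 (by omega)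
        omega
      have hmul : 0 ≤ PySem.Int.floordiv x k * k := mul_nonneg hfd (by omega)
      refine ⟨by omega, by omega, ⟨PySem.Int.floordiv x k, ?_⟩⟩
      have := mul_comm (PySem.Int.floordiv x k) k
      omega

-- ---- lookup characterization of a foldl of step ----
lemma getD_foldl_step (l : List (String × Int)) (d : PySem.Dict String Int) (u : String) :
    (l.foldl step d).getD u 0 =
      l.foldl (fun m p => if p.1 = u ∧ 3 ≤ p.2 then max m p.2 else m) (d.getD u 0) := by
  induction l generalizing d with
  | nil => simp
  | cons p l ih =>
    simp only [List.foldl_cons]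
    rw [ih]
    congr 1
    unfold step
    by_cases h3 : 3 ≤ p.2
    · rw [if_pos h3]
      by_cases hg : d.getD p.1 0 < p.2
      · rw [if_pos hg, PySem.Dict.getD_insert]
        by_cases hu : u = p.1
        · rw [if_pos hu, if_pos ⟨hu.symm, h3⟩, hu, (max_eq_right (le_of_lt hg))]
        · rw [if_neg hu, if_neg (fun hc => hu hc.1.symm)]
      · rw [if_neg hg]
        by_cases hu : p.1 = u
        · rw [if_pos ⟨hu, h3⟩, ← hu, (max_eq_left (not_lt.mp hg))]
        · rw [if_neg (fun hc => hu hc.1)]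
    · rw [if_neg h3, if_neg (fun hc => h3 hc.2)]

lemma contains_foldl_step (l : List (String × Int)) (d : PySem.Dict String Int) (u : String) :
    (l.foldl step d).contains u = (d.contains u || l.any (fun p => p.1 == u && decide (3 ≤ p.2))) := by
  have hstep : ∀ (d : PySem.Dict String Int) (p : String × Int),
      (step d p).contains u = (d.contains u || (p.1 == u && decide (3 ≤ p.2))) := by
    intro d p
    unfold step
    by_cases h3 : 3 ≤ p.2
    · rw [if_pos h3]
      by_cases hg : d.getD p.1 0 < p.2
      · rw [if_pos hg, PySem.Dict.contains_insert]
        by_cases hu : p.1 = u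
        · simp [hu, h3]
        · simp [show (u == p.1) = false from beq_eq_false_iff_ne.mpr (fun h => hu h.symm),
            show (p.1 == u) = false from beq_eq_false_iff_ne.mpr hu]
      · rw [if_neg hg]
        by_cases hu : p.1 = u
        · have hgd : 3 ≤ d.getD p.1 0 := le_trans h3 (not_lt.mp hg)
          have hcon : d.contains p.1 = true := by
            cases hcc : d.contains p.1 with
            | true => rfl
            | false =>
              have := PySem.Dict.getD_of_not_contains d (0:Int) hcc
              omega
          rw [← hu]
          simp [hcon]
        · simp [show (p.1 == u) = false from beq_eq_false_iff_ne.mpr hu]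
    · simp [h3]
  induction l generalizing d with
  | nil => simp
  | cons p l ih =>
    simp only [List.foldl_cons, List.any_cons]
    rw [ih, hstep, Bool.or_assoc]

lemma nodup_keys_foldl_step (l : List (String × Int)) (d : PySem.Dict String Int)
    (h : d.keys.Nodup) : (l.foldl step d).keys.Nodup := by
  induction l generalizing d with
  | nil => exact h
  | cons p l ih =>
    simp only [List.foldl_cons]
    apply ih
    unfold step
    split_ifs with h1 h2
    · exact PySem.Dict.nodup_keys_insert _ _ _ h
    · exact h
    · exact h

lemma foldl_step_perm_lookups (l₁ l₂ : List (String × Int)) (h : l₁.Perm l₂) (u : String) :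
    (l₁.foldl step PySem.Dict.empty).getD u 0 = (l₂.foldl step PySem.Dict.empty).getD u 0 ∧
    (l₁.foldl step PySem.Dict.empty).contains u = (l₂.foldl step PySem.Dict.empty).contains u := by
  constructor
  · rw [getD_foldl_step, getD_foldl_step]
    refine @List.Perm.foldl_eq _ _ _ _ _ ⟨?_⟩ h _
    intro m p q
    dsimp only
    split_ifs <;> simp [max_right_comm]
  · rw [contains_foldl_step, contains_foldl_step, h.any_eq]

-- ---- from equal lookups to equal sorted items ----
lemma sorted_items_eq (dA dB : PySem.Dict String Int)
    (hA : dA.keys.Nodup) (hB : dB.keys.Nodup)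
    (hc : ∀ u, dA.contains u = dB.contains u)
    (hg : ∀ u, dA.getD u 0 = dB.getD u 0) :
    PySem.List.sorted dA.items (fun t => t.1) false =
      PySem.List.sorted dB.items (fun t => t.1) false ∧ dA.size = dB.size := by
  have hkeys : dA.keys.Perm dB.keys := by
    rw [List.perm_ext_iff_of_nodup hA hB]
    intro u
    rw [← PySem.Dict.contains_iff_mem_keys, ← PySem.Dict.contains_iff_mem_keys, hc u]
  have hiA : dA.items = dA.keys.map (fun u => (u, dB.getD u 0)) := by
    rw [PySem.Dict.items_eq_map_keys dA hA 0]
    exact List.map_congr_left fun u _ => by rw [hg]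
  have hiB : dB.items = dB.keys.map (fun u => (u, dB.getD u 0)) :=
    PySem.Dict.items_eq_map_keys dB hB 0
  have hperm : dA.items.Perm dB.items := by
    rw [hiA, hiB]
    exact hkeys.map _
  constructor
  · apply PySem.List.sorted_eq_of_perm_of_pairwise_lt
    · exact (PySem.List.sorted_perm dB.items (fun t => t.1) false).trans hperm.symm
    · have hle := PySem.List.sorted_pairwise dB.items (fun t : String × Int => t.1)
      have hnd : ((PySem.List.sorted dB.items (fun t : String × Int => t.1) false).map
          (fun t : String × Int => t.1)).Nodup := by
        have hp : ((PySem.List.sorted dB.items (fun t : String × Int => t.1) false).map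
            (fun t : String × Int => t.1)).Perm dB.keys :=
          (PySem.List.sorted_perm dB.items (fun t : String × Int => t.1) false).map
            (fun t : String × Int => t.1)
        exact hp.nodup_iff.mpr hB
      have hne := List.pairwise_map.mp hnd
      exact (hle.and hne).imp fun h => lt_of_le_of_ne h.1 h.2
  · exact hperm.length_eq

-- ---- rendering: A's '+= u,c;' then [:-1] is B's ';'.join ----
lemma renderFold_toList (ps : List String) (acc : String) :
    ((ps.foldl (fun a p => a ++ p ++ ";") acc)).toList
      = acc.toList ++ ps.flatMap (fun p => p.toList ++ [';']) := by
  induction ps generalizing acc with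
  | nil => simp
  | cons p rest ih =>
    simp only [List.foldl_cons, List.flatMap_cons, ih, String.toList_append]
    simp [show (";" : String).toList = [';'] from rfl]

lemma joinChar_eq (ps : List String) :
    PySem.Chars.join [';'] (ps.map String.toList)
      = (ps.flatMap (fun p => p.toList ++ [';'])).dropLast := by
  induction ps with
  | nil => simp [PySem.Chars.join_nil]
  | cons p rest ih =>
    cases rest with
    | nil => simp [PySem.Chars.join_singleton]
    | cons q rest' =>
      rw [List.map_cons, List.map_cons, PySem.Chars.join_cons_cons, ← List.map_cons, ih]
      have hne : (List.flatMap (fun p => p.toList ++ [';']) (q :: rest')) ≠ [] := by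
        simp [List.flatMap_cons]
      rw [show List.flatMap (fun p => p.toList ++ [';']) (p :: q :: rest')
            = p.toList ++ [';'] ++ List.flatMap (fun p => p.toList ++ [';']) (q :: rest') from by
          simp [List.append_assoc],
        List.dropLast_append_of_ne_nil hne]

lemma render_eq (ps : List String) :
    PySem.Str.slice (ps.foldl (fun acc p => acc ++ p ++ ";") "") none (some (-1)) =
      PySem.Str.join ";" ps := by
  apply String.ext
  rw [PySem.Str.toList_slice, PySem.Chars.slice_eq_listSlice, PySem.List.slice_to_neg_one,
    renderFold_toList, PySem.Str.toList_join]
  simp [joinChar_eq, show (";" : String).toList = [';'] from rfl,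
    show ("" : String).toList = ([] : List Char) from rfl]

-- ---- the two dicts agree on every lookup ----
lemma dicts_agree (s : String) :
    let dA := (PySem.List.pyRange 1 7 1).foldl (fun sats size =>
      (PySem.List.pyRange 0 (PySem.Str.len s - PySem.Int.mod (PySem.Str.len s) size) 1).foldl
        (fun sats i => findSrrInner s size
          (PySem.List.pyRange i (PySem.Str.len s - PySem.Int.mod (PySem.Str.len s) size) size)
          1 sats) sats) PySem.Dict.empty
    let dB := (PySem.List.pyRange 1 7 1).foldl (fun best k =>
      (PySem.List.pyRange 0 k 1).foldl (fun best f =>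
        (findSrrAltInner s k
          (PySem.List.pyRange f (PySem.Str.len s - PySem.Int.mod (PySem.Str.len s) k) k).reverse
          0 best).2) best) PySem.Dict.empty
    (∀ u, dA.contains u = dB.contains u) ∧ (∀ u, dA.getD u 0 = dB.getD u 0) ∧
      dA.keys.Nodup ∧ dB.keys.Nodup := by
  intro dA dB
  have hA : dA = ((PySem.List.pyRange 1 7 1).flatMap
      (fun k => (PySem.List.pyRange 0 (lim s k) 1).map (recAt s k))).foldl
        step PySem.Dict.empty := by
    rw [← flatMap_foldl_step]
    apply PySem.List.foldl_congr_mem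
    intro d k hkmem
    have hk1 : 1 ≤ k := by
      rw [PySem.List.mem_pyRange_one] at hkmem
      omega
    rw [List.foldl_map]
    apply PySem.List.foldl_congr_mem
    intro d' i himem
    rw [PySem.List.mem_pyRange_one] at himem
    exact findSrrInner_step s k i hk1 himem.1 himem.2 d'
  have hB : dB = ((PySem.List.pyRange 1 7 1).flatMap
      (fun k => (((PySem.List.pyRange 0 k 1).flatMap
        (fun f => (PySem.List.pyRange f (lim s k) k).reverse)).map (recAt s k)))).foldl
          step PySem.Dict.empty := by
    rw [← flatMap_foldl_step]
    apply PySem.List.foldl_congr_mem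
    intro d k hkmem
    have hk1 : 1 ≤ k := by
      rw [PySem.List.mem_pyRange_one] at hkmem
      omega
    rw [List.map_flatMap, ← flatMap_foldl_step]
    apply PySem.List.foldl_congr_mem
    intro d' f hfmem
    rw [PySem.List.mem_pyRange_one] at hfmem
    rw [findSrrAltInner_eq]
    dsimp only
    show List.foldl step d' (recsOf s k (PySem.List.pyRange f (lim s k) k)).reverse
      = List.foldl step d' (List.map (recAt s k) (PySem.List.pyRange f (lim s k) k).reverse)
    rw [recsOf_frame s k hk1 (lim s k - f).toNat f le_rfl hfmem.1, List.map_reverse]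
  have hperm : (((PySem.List.pyRange 1 7 1).flatMap
      (fun k => (((PySem.List.pyRange 0 k 1).flatMap
        (fun f => (PySem.List.pyRange f (lim s k) k).reverse)).map (recAt s k))))).Perm
      ((PySem.List.pyRange 1 7 1).flatMap
        (fun k => (PySem.List.pyRange 0 (lim s k) 1).map (recAt s k))) := by
    apply perm_flatMap_congr
    intro k hkmem
    have hk1 : 1 ≤ k := by
      rw [PySem.List.mem_pyRange_one] at hkmem
      omega
    exact (frames_perm s k hk1).map (recAt s k)
  refine ⟨?_, ?_, ?_, ?_⟩
  · intro u
    rw [hA, hB]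
    exact ((foldl_step_perm_lookups _ _ hperm u).2).symm
  · intro u
    rw [hA, hB]
    exact ((foldl_step_perm_lookups _ _ hperm u).1).symm
  · rw [hA]; exact nodup_keys_foldl_step _ _ PySem.Dict.nodup_keys_empty
  · rw [hB]; exact nodup_keys_foldl_step _ _ PySem.Dict.nodup_keys_empty

lemma outputs_eq (dA dB : PySem.Dict String Int)
    (hA : dA.keys.Nodup) (hB : dB.keys.Nodup)
    (hc : ∀ u, dA.contains u = dB.contains u)
    (hg : ∀ u, dA.getD u 0 = dB.getD u 0) :
    (if dA.size ≠ 0 then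
      some (PySem.Str.slice ((PySem.List.sorted dA.items (fun t => t.1) false).foldl
        (fun acc p => acc ++ p.1 ++ "," ++ PySem.Int.toStr p.2 ++ ";") "") none (some (-1)))
    else none)
    = (if dB.size ≠ 0 then
      some (PySem.Str.join ";" ((PySem.List.sorted dB.items (fun t => t.1) false).map
        (fun p => p.1 ++ "," ++ PySem.Int.toStr p.2)))
    else none) := by
  obtain ⟨hsorted, hsize⟩ := sorted_items_eq dA dB hA hB hc hg
  rw [hsize, hsorted]
  split_ifs with h
  · congr 1
    rw [show (fun (acc : String) (p : String × Int) =>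
          acc ++ p.1 ++ "," ++ PySem.Int.toStr p.2 ++ ";")
        = (fun (acc : String) (p : String × Int) =>
          acc ++ (p.1 ++ "," ++ PySem.Int.toStr p.2) ++ ";") from by
      funext a p
      simp [String.append_assoc]]
    rw [← List.foldl_map (f := fun p : String × Int => p.1 ++ "," ++ PySem.Int.toStr p.2)
      (g := fun (a q : String) => a ++ q ++ ";")]
    exact render_eq _
  · rfl

-- ===== VERDICT (by name: the statement is the Claim_ definition above) =====
theorem find_srr_spec : Claim_equal_find_srr := by
  intro s _
  show find_srr s = find_srr_alt s
  obtain ⟨hc, hg, hA, hB⟩ := dicts_agree s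
  exact outputs_eq _ _ hA hB hc hg
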